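-- pv_equiv track=rewrite | github.com/ableonard/google-code-jam-solutions | 2012/round1/r1_12b.py | count_playthroughs
-- ===== SOURCE A (Python) =====
-- def count_playthroughs(first_stars, second_stars):
-- 	cur_stars = 0
-- 	completions = 0
--
-- 	try:
-- 		passed_level = first_stars.index(cur_stars)
-- 		first_stars[passed_level] = None
-- 		completions = completions + 1
-- 		cur_stars = cur_stars + 1
-- 	except ValueError:
-- 		return completions
--
-- 	while (passed_level >= 0):
-- 		if len(first_stars) > 0:
-- 			try:
-- 				passed_level = first_stars.index(cur_stars)
-- 			except ValueError:
-- 				try: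
-- 					passed_level = second_stars.index(cur_stars)
-- 				except ValueError:
-- 					return completions
-- 				else:
-- 					second_stars[passed_level] = None
-- 					completions = completions + 1
-- 					cur_stars = cur_stars + 1
-- 			else:
-- 				first_stars[passed_level] = None
-- 				completions = completions + 1
-- 		else:
-- 			try:
-- 				passed_level = second_stars.index(cur_stars)
-- 				second_stars[passed_level] = None
-- 				completions = completions + 1
-- 			except ValueError:
-- 				return completions
-- ===== SOURCE B (Python) =====
-- from collections import Counter
--
-- def count_playthroughs(first_stars, second_stars):
--     c1 = Counter(first_stars)
--     c2 = Counter(second_stars)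
--     if c1[0] == 0:
--         return 0
--     completions = 1 + c1[1]
--     cur = 1
--     while c2[cur] > 0:
--         cur += 1
--         completions += 1 + c1[cur]
--     return completions
-- ===== Notes on version B (the rewrite author's own statement) =====
-- stated objective: alternative
-- what changed: B builds Counter frequency maps of both lists once and replays the greedy simulation as dictionary lookups (all first-list copies of the current star value consumed in one addition), instead of A's repeated list.index scans over lists it mutates with None markers; B also does not mutate its arguments.
import Mathlib
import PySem

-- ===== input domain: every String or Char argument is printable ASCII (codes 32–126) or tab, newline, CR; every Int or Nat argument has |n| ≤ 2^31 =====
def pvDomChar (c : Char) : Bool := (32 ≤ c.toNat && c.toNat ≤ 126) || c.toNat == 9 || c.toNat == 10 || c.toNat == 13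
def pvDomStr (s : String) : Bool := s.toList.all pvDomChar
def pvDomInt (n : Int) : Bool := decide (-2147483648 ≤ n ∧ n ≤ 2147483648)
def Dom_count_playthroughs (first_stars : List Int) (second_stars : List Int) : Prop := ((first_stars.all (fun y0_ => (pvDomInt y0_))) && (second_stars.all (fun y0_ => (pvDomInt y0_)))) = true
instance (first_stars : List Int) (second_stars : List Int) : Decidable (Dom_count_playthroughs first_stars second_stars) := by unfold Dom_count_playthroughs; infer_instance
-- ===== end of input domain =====

-- B replaces A's repeated list.index scans over lists it mutates with None markers by two
-- Counter frequency maps built once and an arithmetic replay of the greedy simulation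
-- (objective: alternative).  NOTE: the Python A mutates both argument lists in place
-- (overwrites consumed entries with None); B does not — the equivalence proved here is
-- about the RETURN value only.

-- ===== PORT A =====
-- Lists whose consumed entries Python overwrites with None are modelled as List (Option Int);
-- first_stars.index(cur_stars) is PySem.List.index? fs (some cur) (first match, ValueError = none).

-- number of not-yet-consumed (non-None) entries: the termination measure of A's while loop
def pvCountSomes (xs : List (Option Int)) : Nat := xs.countP (·.isSome)

-- if .index found a value, overwriting that slot with None consumes one non-None entry
theorem pvCountSomes_set_lt (xs : List (Option Int)) (i : Nat) (a : Int)
    (h : PySem.List.index? xs (some a) = some i) :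
    pvCountSomes (xs.set i none) < pvCountSomes xs := by
  obtain ⟨hi, hx, -⟩ := PySem.List.getElem_of_index?_eq_some h
  rw [List.set_eq_take_cons_drop _ hi]
  conv_rhs => rw [← List.take_append_drop i xs, List.drop_eq_getElem_cons hi]
  simp [pvCountSomes, List.countP_append, hx]

-- A's while loop: 'passed_level >= 0' is always true (list indices are ≥ 0), so the loop
-- only exits through its 'return completions' branches; branch order is A's.
def pvALoop (fs ss : List (Option Int)) (cur completions : Int) : Int :=
  if 0 < fs.length then
    match h1 : PySem.List.index? fs (some cur) with
    | some i => pvALoop (fs.set i none) ss cur (completions + 1)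
    | none =>
      match h2 : PySem.List.index? ss (some cur) with
      | some j => pvALoop fs (ss.set j none) (cur + 1) (completions + 1)
      | none => completions
  else
    match h2 : PySem.List.index? ss (some cur) with
    | some j => pvALoop fs (ss.set j none) cur (completions + 1)
    | none => completions
termination_by pvCountSomes fs + pvCountSomes ss
decreasing_by
  · have := pvCountSomes_set_lt fs i cur h1; omega
  · have := pvCountSomes_set_lt ss j cur h2; omega
  · have := pvCountSomes_set_lt ss j cur h2; omega

def count_playthroughs (first_stars : List Int) (second_stars : List Int) : Int :=
  let fs := first_stars.map some
  match PySem.List.index? fs (some (0 : Int)) with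
  | none => 0
  | some i => pvALoop (fs.set i none) (second_stars.map some) 1 1

-- ===== PORT B =====
-- Source B's while loop; 'fuel = len(second_stars)' only makes the recursion structural: the loop
-- body runs at most len(second_stars) times (each iteration needs a fresh value in c2).
def pvBLoop (c1 c2 : PySem.Dict Int Int) (cur completions : Int) (fuel : Nat) : Int :=
  match fuel with
  | 0 => completions
  | f + 1 =>
    if c2.getD cur 0 > 0 then
      pvBLoop c1 c2 (cur + 1) (completions + 1 + c1.getD (cur + 1) 0) f
    else completions

def count_playthroughs_alt (first_stars : List Int) (second_stars : List Int) : Int :=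
  let c1 := PySem.Dict.counter first_stars
  let c2 := PySem.Dict.counter second_stars
  if c1.getD 0 0 = 0 then 0
  else pvBLoop c1 c2 1 (1 + c1.getD 1 0) second_stars.length

-- ===== PRECONDITION & SPEC =====
def Spec_count_playthroughs (first_stars : List Int) (second_stars : List Int) (out : Int) : Prop := out = count_playthroughs_alt first_stars second_stars
instance (first_stars : List Int) (second_stars : List Int) (out : Int) : Decidable (Spec_count_playthroughs first_stars second_stars out) := by unfold Spec_count_playthroughs; infer_instance

-- ===== CLAIM (what is proved, stated in full; the proofs are below) =====
def Claim_equal_count_playthroughs : Prop := ∀ (first_stars : List Int) (second_stars : List Int), Dom_count_playthroughs first_stars second_stars → Spec_count_playthroughs first_stars second_stars (count_playthroughs first_stars second_stars)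

-- ===== LEMMAS AND PROOFS =====

-- overwriting a slot that held (some a) with none: counts of other values are unchanged
theorem pv_count_set_of_ne (xs : List (Option Int)) (i : Nat) (a v : Int)
    (hi : i < xs.length) (hx : xs[i] = some a) (hne : v ≠ a) :
    (xs.set i none).count (some v) = xs.count (some v) := by
  rw [List.set_eq_take_cons_drop _ hi]
  conv_rhs => rw [← List.take_append_drop i xs, List.drop_eq_getElem_cons hi]
  simp [List.count_append, List.count_cons, hx]
  intro h; exact absurd (Eq.symm h) hne

-- … and the count of the value itself drops by exactly one
theorem pv_count_set_self (xs : List (Option Int)) (i : Nat) (a : Int)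
    (hi : i < xs.length) (hx : xs[i] = some a) :
    xs.count (some a) = (xs.set i none).count (some a) + 1 := by
  rw [List.set_eq_take_cons_drop _ hi]
  conv_lhs => rw [← List.take_append_drop i xs, List.drop_eq_getElem_cons hi]
  simp [List.count_append, List.count_cons, hx]
  omega

-- pure characterisation of A's loop tail once first_stars holds no more copies of cur
def pvSpecRest (fs ss : List (Option Int)) (cur : Int) : Int :=
  match h : PySem.List.index? ss (some cur) with
  | none => 0
  | some j => 1 + (fs.count (some (cur + 1)) : Int) + pvSpecRest fs (ss.set j none) (cur + 1)
termination_by pvCountSomes ss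
decreasing_by exact pvCountSomes_set_lt ss j cur h

theorem pvSpecRest_none (fs ss : List (Option Int)) (cur : Int)
    (h : PySem.List.index? ss (some cur) = none) : pvSpecRest fs ss cur = 0 := by
  rw [pvSpecRest]; split
  · rfl
  · next j heq => rw [h] at heq; simp at heq

theorem pvSpecRest_some (fs ss : List (Option Int)) (cur : Int) (j : Nat)
    (h : PySem.List.index? ss (some cur) = some j) :
    pvSpecRest fs ss cur
      = 1 + (fs.count (some (cur + 1)) : Int) + pvSpecRest fs (ss.set j none) (cur + 1) := by
  rw [pvSpecRest]; split
  · next heq => rw [h] at heq; simp at heq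
  · next j' heq => rw [h] at heq; injection heq with e; subst e; rfl

theorem pvALoop_found_first (fs ss : List (Option Int)) (cur comp : Int) (i : Nat)
    (hfs : 0 < fs.length) (h1 : PySem.List.index? fs (some cur) = some i) :
    pvALoop fs ss cur comp = pvALoop (fs.set i none) ss cur (comp + 1) := by
  rw [pvALoop, if_pos hfs]; split
  · next i' heq => rw [h1] at heq; injection heq with e; subst e; rfl
  · next heq => rw [h1] at heq; simp at heq

theorem pvALoop_found_second (fs ss : List (Option Int)) (cur comp : Int) (j : Nat)
    (hfs : 0 < fs.length) (h1 : PySem.List.index? fs (some cur) = none)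
    (h2 : PySem.List.index? ss (some cur) = some j) :
    pvALoop fs ss cur comp = pvALoop fs (ss.set j none) (cur + 1) (comp + 1) := by
  rw [pvALoop, if_pos hfs]; split
  · next i' heq => rw [h1] at heq; simp at heq
  · next heq =>
      split
      · next j' heq2 => rw [h2] at heq2; injection heq2 with e; subst e; rfl
      · next heq2 => rw [h2] at heq2; simp at heq2

theorem pvALoop_found_none (fs ss : List (Option Int)) (cur comp : Int)
    (hfs : 0 < fs.length) (h1 : PySem.List.index? fs (some cur) = none)
    (h2 : PySem.List.index? ss (some cur) = none) :
    pvALoop fs ss cur comp = comp := by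
  rw [pvALoop, if_pos hfs]; split
  · next i' heq => rw [h1] at heq; simp at heq
  · next heq =>
      split
      · next j' heq2 => rw [h2] at heq2; simp at heq2
      · next heq2 => rfl

theorem pvSpecRest_congr (n : Nat) : ∀ (ss fs fs' : List (Option Int)) (cur : Int),
    pvCountSomes ss = n →
    (∀ v : Int, cur < v → fs.count (some v) = fs'.count (some v)) →
    pvSpecRest fs ss cur = pvSpecRest fs' ss cur := by
  induction n using Nat.strong_induction_on with
  | _ n ih =>
    intro ss fs fs' cur hn hcnt
    cases h : PySem.List.index? ss (some cur) with
    | none => rw [pvSpecRest_none fs ss cur h, pvSpecRest_none fs' ss cur h]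
    | some j =>
      have hlt := pvCountSomes_set_lt ss j cur h
      have hrec := ih (pvCountSomes (ss.set j none)) (by omega) (ss.set j none) fs fs'
        (cur + 1) rfl (fun v hv => hcnt v (by omega))
      rw [pvSpecRest_some fs ss cur j h, pvSpecRest_some fs' ss cur j h,
        hcnt (cur + 1) (by omega), hrec]

theorem pvALoop_eq (n : Nat) : ∀ (fs ss : List (Option Int)) (cur comp : Int),
    pvCountSomes fs + pvCountSomes ss = n → 0 < fs.length →
    pvALoop fs ss cur comp = comp + (fs.count (some cur) : Int) + pvSpecRest fs ss cur := by
  induction n using Nat.strong_induction_on with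
  | _ n ih =>
    intro fs ss cur comp hn hfs
    cases h1 : PySem.List.index? fs (some cur) with
    | some i =>
      rw [pvALoop_found_first fs ss cur comp i hfs h1]
      obtain ⟨hi, hx, -⟩ := PySem.List.getElem_of_index?_eq_some h1
      have hlt := pvCountSomes_set_lt fs i cur h1
      have hlen : 0 < (fs.set i none).length := by simpa using hfs
      rw [ih (pvCountSomes (fs.set i none) + pvCountSomes ss) (by omega) _ _ cur (comp + 1)
        rfl hlen]
      rw [pvSpecRest_congr (pvCountSomes ss) ss (fs.set i none) fs cur rfl
        (fun v hv => pv_count_set_of_ne fs i cur v hi hx (by omega))]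
      have hc := pv_count_set_self fs i cur hi hx
      push_cast [hc]
      ring
    | none =>
      have hc : fs.count (some cur) = 0 :=
        List.count_eq_zero.mpr ((PySem.List.index?_eq_none_iff _ _).mp h1)
      cases h2 : PySem.List.index? ss (some cur) with
      | some j =>
        have hlt := pvCountSomes_set_lt ss j cur h2
        rw [pvALoop_found_second fs ss cur comp j hfs h1 h2,
          ih (pvCountSomes fs + pvCountSomes (ss.set j none)) (by omega) fs _ (cur + 1)
            (comp + 1) rfl hfs,
          pvSpecRest_some fs ss cur j h2]
        push_cast [hc]
        ring
      | none =>
        rw [pvALoop_found_none fs ss cur comp hfs h1 h2, pvSpecRest_none fs ss cur h2]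
        push_cast [hc]
        ring

theorem pvBLoop_eq (fuel : Nat) : ∀ (fs ss : List (Option Int)) (cur comp : Int)
    (c1 c2 : PySem.Dict Int Int),
    pvCountSomes ss ≤ fuel →
    (∀ v : Int, cur ≤ v → c2.getD v 0 = (ss.count (some v) : Int)) →
    (∀ v : Int, cur < v → c1.getD v 0 = (fs.count (some v) : Int)) →
    pvBLoop c1 c2 cur comp fuel = comp + pvSpecRest fs ss cur := by
  induction fuel with
  | zero =>
    intro fs ss cur comp c1 c2 hfuel hc2 hc1
    have hnm : some cur ∉ ss := by
      intro hm
      have : 0 < pvCountSomes ss := List.countP_pos_iff.mpr ⟨some cur, hm, rfl⟩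
      omega
    rw [pvSpecRest_none fs ss cur ((PySem.List.index?_eq_none_iff _ _).mpr hnm)]
    simp [pvBLoop]
  | succ f ihf =>
    intro fs ss cur comp c1 c2 hfuel hc2 hc1
    rw [pvBLoop]
    cases h : PySem.List.index? ss (some cur) with
    | none =>
      have hc : ss.count (some cur) = 0 :=
        List.count_eq_zero.mpr ((PySem.List.index?_eq_none_iff _ _).mp h)
      rw [pvSpecRest_none fs ss cur h, if_neg (by rw [hc2 cur le_rfl, hc]; simp)]
      simp
    | some j =>
      rw [pvSpecRest_some fs ss cur j h]
      have hmem : some cur ∈ ss := (PySem.List.index?_isSome_iff ss (some cur)).mp (by rw [h]; rfl)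
      have hpos : 0 < ss.count (some cur) := List.count_pos_iff.mpr hmem
      rw [if_pos (by rw [hc2 cur le_rfl]; exact_mod_cast hpos)]
      obtain ⟨hj, hxj, -⟩ := PySem.List.getElem_of_index?_eq_some h
      have hlt := pvCountSomes_set_lt ss j cur h
      rw [ihf fs (ss.set j none) (cur + 1) (comp + 1 + c1.getD (cur + 1) 0) c1 c2
        (by omega)
        (fun v hv => by
          rw [hc2 v (by omega), pv_count_set_of_ne ss j cur v hj hxj (by omega)])
        (fun v hv => hc1 v (by omega))]
      rw [hc1 (cur + 1) (by omega)]
      ring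

-- ===== VERDICT (by name: the statement is the Claim_ definition above) =====
theorem pv_count_map_some (l : List Int) (v : Int) :
    (l.map some).count (some v) = l.count v :=
  List.count_map_of_injective l some (Option.some_injective _) v

theorem count_playthroughs_spec : Claim_equal_count_playthroughs := by
  intro first second _
  unfold Spec_count_playthroughs
  have hA : count_playthroughs first second
      = match PySem.List.index? (first.map some) (some (0 : Int)) with
        | none => 0
        | some i => pvALoop ((first.map some).set i none) (second.map some) 1 1 := rfl
  have hB : count_playthroughs_alt first second
      = if (PySem.Dict.counter first).getD 0 0 = 0 then 0
        else pvBLoop (PySem.Dict.counter first) (PySem.Dict.counter second) 1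
          (1 + (PySem.Dict.counter first).getD 1 0) second.length := rfl
  rw [hA, hB]
  cases h : PySem.List.index? (first.map some) (some (0 : Int)) with
  | none =>
    have h0 : (0 : Int) ∉ first := by
      intro hm
      exact (PySem.List.index?_eq_none_iff _ _).mp h (List.mem_map_of_mem hm)
    have hz : first.count (0 : Int) = 0 := List.count_eq_zero.mpr h0
    simp [PySem.Dict.getD_counter, hz]
  | some i =>
    show pvALoop ((first.map some).set i none) (second.map some) 1 1 = _
    obtain ⟨hi, hx, -⟩ := PySem.List.getElem_of_index?_eq_some h
    have hlen0 : i < first.length := by simpa using hi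
    have hlen : 0 < ((first.map some).set i none).length := by simp; omega
    rw [pvALoop_eq (pvCountSomes ((first.map some).set i none)
      + pvCountSomes (second.map some)) _ _ 1 1 rfl hlen]
    have h0mem : (0 : Int) ∈ first := by
      have : some (0 : Int) ∈ first.map some :=
        (PySem.List.index?_isSome_iff _ _).mp (by rw [h]; rfl)
      simpa using this
    have hc0 : (PySem.Dict.counter first).getD 0 0 ≠ 0 := by
      rw [PySem.Dict.getD_counter]
      have := List.count_pos_iff.mpr h0mem
      omega
    rw [if_neg hc0]
    have hfuel : pvCountSomes (second.map some) ≤ second.length := by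
      simp [pvCountSomes, List.countP_map, Function.comp_def]
    rw [pvBLoop_eq second.length ((first.map some).set i none) (second.map some) 1
      (1 + (PySem.Dict.counter first).getD 1 0) _ _ hfuel
      (fun v _ => by rw [PySem.Dict.getD_counter, pv_count_map_some])
      (fun v hv => by
        rw [PySem.Dict.getD_counter,
          pv_count_set_of_ne (first.map some) i 0 v hi hx (by omega),
          pv_count_map_some])]
    rw [PySem.Dict.getD_counter,
      show ((first.map some).set i none).count (some (1 : Int))
          = (first.map some).count (some (1 : Int)) from
        pv_count_set_of_ne (first.map some) i 0 1 hi hx (by omega),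
      pv_count_map_some]
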